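-- pv_equiv track=rewrite | github.com/samar2788/codwars-katas | Green_Valley.py | make_valley
-- ===== SOURCE A (Python) =====
-- def make_valley(arr):
--     left=[]
--     right=[]
--     sa=sorted(arr,reverse=True)
--     for i in range(len(sa)):
--         if i%2==0:
--             left.append(sa[i])
--         else:
--             right.append(sa[i])
--     fl=left + sorted(right)
--     return fl
-- ===== SOURCE B (Python) =====
-- def make_valley(arr):
--     b = sorted(arr)
--     evens = b[::2]
--     odds = b[1::2]
--     if len(b) % 2 == 0:
--         return odds[::-1] + evens
--     return evens[::-1] + odds
-- ===== Notes on version B (the rewrite author's own statement) =====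
-- stated objective: simpler
-- what changed: B sorts once ascending and assembles the valley from the two stride-2 slices (one reversed, chosen by length parity), replacing A's descending sort, Python-level index-parity partition loop and second sort of the right half.
import Mathlib
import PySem

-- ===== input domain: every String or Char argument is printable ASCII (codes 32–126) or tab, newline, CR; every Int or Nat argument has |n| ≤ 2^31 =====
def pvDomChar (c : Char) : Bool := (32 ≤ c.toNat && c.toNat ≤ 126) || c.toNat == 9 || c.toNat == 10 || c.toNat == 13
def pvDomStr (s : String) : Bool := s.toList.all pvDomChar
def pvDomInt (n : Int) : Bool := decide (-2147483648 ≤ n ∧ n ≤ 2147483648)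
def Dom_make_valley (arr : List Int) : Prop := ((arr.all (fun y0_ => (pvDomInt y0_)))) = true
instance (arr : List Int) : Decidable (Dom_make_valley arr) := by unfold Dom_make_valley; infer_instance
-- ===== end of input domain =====

-- B sorts once ascending and assembles the valley from the two stride-2 slices (one reversed,
-- chosen by length parity); A sorts descending, partitions by index parity in a loop and re-sorts
-- the right half. Same return value; B is simpler (no partition loop, single sort).

-- ===== PORT A =====
def make_valley (arr : List Int) : List Int :=
  let sa := PySem.List.sorted arr (fun x => x) true
  let lr := (PySem.List.pyRange 0 (PySem.List.len sa) 1).foldl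
    (fun (p : List Int × List Int) i =>
      if PySem.Int.mod i 2 = 0 then (p.1 ++ [PySem.List.pyGetD sa i 0], p.2)
      else (p.1, p.2 ++ [PySem.List.pyGetD sa i 0])) ([], [])
  lr.1 ++ PySem.List.sorted lr.2 (fun x => x) false

-- ===== PORT B =====
def make_valley_alt (arr : List Int) : List Int :=
  let b := PySem.List.sorted arr (fun x => x) false
  let evens := (PySem.List.slice? b none none 2).getD []       -- b[::2]; step 2 ≠ 0, never none
  let odds := (PySem.List.slice? b (some 1) none 2).getD []    -- b[1::2]
  if PySem.Int.mod (PySem.List.len b) 2 = 0 then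
    ((PySem.List.slice? odds none none (-1)).getD []) ++ evens -- odds[::-1] + evens
  else
    ((PySem.List.slice? evens none none (-1)).getD []) ++ odds -- evens[::-1] + odds

-- ===== PRECONDITION & SPEC =====
def Spec_make_valley (arr : List Int) (out : List Int) : Prop := out = make_valley_alt arr
instance (arr : List Int) (out : List Int) : Decidable (Spec_make_valley arr out) := by unfold Spec_make_valley; infer_instance

-- ===== CLAIM (what is proved, stated in full; the proofs are below) =====
def Claim_equal_make_valley : Prop := ∀ (arr : List Int), Dom_make_valley arr → Spec_make_valley arr (make_valley arr)

-- ===== LEMMAS AND PROOFS =====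

-- every-other-element of a list: strideP true l = l[0::2], strideP false l = l[1::2]
def strideP {α : Type} : Bool → List α → List α
  | _, [] => []
  | true, x :: xs => x :: strideP false xs
  | false, _ :: xs => strideP true xs

theorem strideP_sublist {α : Type} (p : Bool) (l : List α) : (strideP p l).Sublist l := by
  induction l generalizing p with
  | nil => simp [strideP]
  | cons x xs ih =>
    cases p
    · exact (ih true).cons x
    · exact (ih false).cons₂ x

theorem strideP_append {α : Type} (u v : List α) (p : Bool) :
    strideP p (u ++ v) = strideP p u ++ strideP (if u.length % 2 = 0 then p else !p) v := by
  induction u generalizing p with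
  | nil => simp [strideP]
  | cons y ys ih =>
    have h4 : (ys.length + 1) % 2 = 0 ↔ ¬ (ys.length % 2 = 0) := by omega
    by_cases h : ys.length % 2 = 0 <;>
      cases p <;> simp [strideP, ih, h, h4, List.cons_append]

theorem strideP_reverse {α : Type} (p : Bool) (l : List α) :
    strideP p l.reverse = (strideP (if l.length % 2 = 1 then p else !p) l).reverse := by
  induction l generalizing p with
  | nil => simp [strideP]
  | cons x xs ih =>
    rw [List.reverse_cons, strideP_append, List.length_reverse, ih]
    have h2 : (xs.length + 1) % 2 = 1 ↔ xs.length % 2 = 0 := by omega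
    have h3 : xs.length % 2 = 1 ↔ ¬ xs.length % 2 = 0 := by omega
    by_cases h : xs.length % 2 = 0 <;>
      cases p <;> simp [strideP, h, h2, h3]

-- the index list a slice with step 2 enumerates, reduced to strideP
theorem filterMap_range_stride {α : Type} (b : List α) :
    (List.range ((b.length + 1) / 2)).filterMap (fun k => b[2 * k]?) = strideP true b := by
  match b with
  | [] => simp [strideP]
  | [x] => simp [strideP]
  | x :: y :: rest =>
    have ih := filterMap_range_stride rest
    have hlen : ((x :: y :: rest).length + 1) / 2 = (rest.length + 1) / 2 + 1 := by
      simp; omega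
    have hfun : (fun k => (x :: y :: rest)[2 * (k + 1)]?) = fun k => rest[2 * k]? := by
      funext k
      have : 2 * (k + 1) = 2 * k + 1 + 1 := by omega
      rw [this]
      simp
    rw [hlen, List.range_succ_eq_map, List.filterMap_cons, List.filterMap_map]
    simp only [Function.comp_def, hfun, ih]
    simp [strideP]
termination_by b.length

theorem filterMap_range_stride' {α : Type} (b : List α) :
    (List.range (b.length / 2)).filterMap (fun k => b[2 * k + 1]?) = strideP false b := by
  cases b with
  | nil => simp [strideP]
  | cons x xs =>
    have h := filterMap_range_stride xs
    have hfun : (fun k => (x :: xs)[2 * k + 1]?) = fun k => xs[2 * k]? := by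
      funext k; simp
    simp only [List.length_cons, hfun, strideP]
    convert h using 2

-- b[::2] is strideP true b
theorem slice?_two_even {α : Type} (b : List α) :
    PySem.List.slice? b none none 2 = some (strideP true b) := by
  simp only [PySem.List.slice?, PySem.List.sliceIndices]
  norm_num
  have hc : (if 0 < b.length then (((b.length:Int) + 2 - 1) / 2).toNat else 0) = (b.length + 1) / 2 := by
    split_ifs with h <;> omega
  have hf : (fun x : Nat => b[(2 * (x:Int)).toNat]?) = fun k : Nat => b[2 * k]? := by
    funext k
    have : ((2 * (k:Int)).toNat) = 2 * k := by omega
    rw [this]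
  rw [hc, hf, filterMap_range_stride]

-- b[1::2] is strideP false b
theorem slice?_two_odd {α : Type} (b : List α) :
    PySem.List.slice? b (some 1) none 2 = some (strideP false b) := by
  cases b with
  | nil => simp [PySem.List.slice?, PySem.List.sliceIndices, strideP]
  | cons a t =>
    simp only [PySem.List.slice?, PySem.List.sliceIndices]
    norm_num
    have hc : (if 0 < t.length then (((t.length:Int) + 2 - 1) / 2).toNat else 0)
        = (a :: t).length / 2 := by
      split_ifs with h <;> simp <;> omega
    have hf : (fun x : Nat => (a :: t)[(1 + 2 * (x:Int)).toNat]?) = fun k : Nat => (a :: t)[2 * k + 1]? := by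
      funext k
      have : ((1 + 2 * (k:Int)).toNat) = 2 * k + 1 := by omega
      rw [this]
    rw [hc, hf, filterMap_range_stride']

-- sorted(arr, reverse=True) = reverse of sorted(arr), for Int values with the identity key
theorem sorted_rev_eq_reverse (arr : List Int) :
    PySem.List.sorted arr (fun x => x) true = (PySem.List.sorted arr (fun x => x) false).reverse := by
  have h := PySem.List.eq_of_perm_of_pairwise_le_of_injective (fun x : Int => x)
    (fun a b h => h)
    (l₁ := (PySem.List.sorted arr (fun x => x) true).reverse)
    (l₂ := PySem.List.sorted arr (fun x => x) false)
    (((List.reverse_perm _).trans (PySem.List.sorted_perm arr _ true)).trans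
      (PySem.List.sorted_perm arr _ false).symm)
    (List.pairwise_reverse.mpr (PySem.List.sorted_pairwise_rev arr _))
    (PySem.List.sorted_pairwise arr _)
  calc PySem.List.sorted arr (fun x => x) true
      = (PySem.List.sorted arr (fun x => x) true).reverse.reverse := (List.reverse_reverse _).symm
    _ = (PySem.List.sorted arr (fun x => x) false).reverse := by rw [h]

-- A's partition loop, characterised: indices of parity of s go left, the others right
theorem loopA (xs : List Int) (s : Int) (l r : List Int) :
    (PySem.List.enumerate xs s).foldl
      (fun (p : List Int × List Int) ix =>
        if PySem.Int.mod ix.1 2 = 0 then (p.1 ++ [ix.2], p.2) else (p.1, p.2 ++ [ix.2])) (l, r)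
    = if s % 2 = 0 then (l ++ strideP true xs, r ++ strideP false xs)
      else (l ++ strideP false xs, r ++ strideP true xs) := by
  induction xs generalizing s l r with
  | nil => simp [PySem.List.enumerate_nil, strideP]
  | cons x xs ih =>
    rw [PySem.List.enumerate_cons, List.foldl_cons]
    have hmod : PySem.Int.mod s 2 = s % 2 := PySem.Int.mod_eq_emod_of_pos (by norm_num)
    have hpar : (s + 1) % 2 = 0 ↔ ¬ (s % 2 = 0) := by omega
    by_cases h : s % 2 = 0 <;>
      simp only [hmod, h, if_pos, ih, hpar, strideP] <;>
      simp [strideP, List.append_assoc]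

theorem make_valley_eq (arr : List Int) :
    make_valley arr = make_valley_alt arr := by
  unfold make_valley make_valley_alt
  simp only []
  set b := PySem.List.sorted arr (fun x => x) false with hb
  set sa := PySem.List.sorted arr (fun x => x) true with hsa
  have hsab : sa = b.reverse := sorted_rev_eq_reverse arr
  have hloop : (PySem.List.pyRange 0 (PySem.List.len sa) 1).foldl
      (fun (p : List Int × List Int) i =>
        if PySem.Int.mod i 2 = 0 then (p.1 ++ [PySem.List.pyGetD sa i 0], p.2)
        else (p.1, p.2 ++ [PySem.List.pyGetD sa i 0])) ([], [])
      = (strideP true sa, strideP false sa) := by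
    have he := PySem.List.enumerate_eq_map_pyRange sa 0
    have hfold : (PySem.List.enumerate sa).foldl
        (fun (p : List Int × List Int) ix =>
          if PySem.Int.mod ix.1 2 = 0 then (p.1 ++ [ix.2], p.2) else (p.1, p.2 ++ [ix.2])) ([], [])
        = (PySem.List.pyRange 0 (PySem.List.len sa) 1).foldl
          (fun (p : List Int × List Int) i =>
            if PySem.Int.mod i 2 = 0 then (p.1 ++ [PySem.List.pyGetD sa i 0], p.2)
            else (p.1, p.2 ++ [PySem.List.pyGetD sa i 0])) ([], []) := by
      rw [he, List.foldl_map]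
    rw [← hfold, loopA]
    norm_num
  rw [hloop]
  have hpw : (strideP false sa).Pairwise (fun a b : Int => b ≤ a) :=
    (PySem.List.sorted_pairwise_rev arr (fun x => x)).sublist (strideP_sublist false sa)
  have hsortr : PySem.List.sorted (strideP false sa) (fun x => x) false = (strideP false sa).reverse :=
    PySem.List.sorted_id_eq_of_perm_of_pairwise _ _ (List.reverse_perm _)
      (List.pairwise_reverse.mpr hpw)
  rw [hsortr]
  rw [slice?_two_even, slice?_two_odd, PySem.List.slice?_none_none_neg_one,
      PySem.List.slice?_none_none_neg_one]
  simp only [Option.getD_some]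
  by_cases h : b.length % 2 = 0
  · have hne : ¬ (b.length % 2 = 1) := by omega
    rw [hsab, strideP_reverse, strideP_reverse]
    simp [h, hne]
    intro h'; exfalso; omega
  · have h1 : b.length % 2 = 1 := by omega
    rw [hsab, strideP_reverse, strideP_reverse]
    simp [h1]
    omega

-- ===== VERDICT (by name: the statement is the Claim_ definition above) =====
theorem make_valley_spec : Claim_equal_make_valley := by
  intro arr _
  unfold Spec_make_valley
  exact make_valley_eq arr
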